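-- pv_equiv track=rewrite | github.com/Alys9999/ICS33 | tests/q1helper/q1solution.py | clients_by_volume
-- ===== SOURCE A (Python) =====
-- def clients_by_volume(db : {str: [(str,int,int)]}) -> [str]:
--     c=db.keys()
--     re_dict=dict()
--     re_list=[]
--     for i in c:
--         re_dict[i]=0
--         for x in db[i]:
--             num=re_dict[i]+abs(x[1])
--             re_dict[i]=num
--     sorted_key=dict()
--     for key in sorted(re_dict):
--         sorted_key[key]=re_dict[key]
--     client_list=sorted(sorted_key.items(), key=lambda x:x[1], reverse=True)
--     for client in client_list:
--         re_list.append(client[0])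
--     return re_list
-- ===== SOURCE B (Python) =====
-- def clients_by_volume(db : {str: [(str,int,int)]}) -> [str]:
--     ranking = []          # list of (total, name), kept sorted: total desc, name asc
--     for name, trades in db.items():
--         total = 0
--         for t in trades:
--             total += abs(t[1])
--         # binary search for the insertion point in the sorted ranking
--         lo, hi = 0, len(ranking)
--         while lo < hi:
--             mid = (lo + hi) // 2
--             e = ranking[mid]
--             if e[0] > total or (e[0] == total and e[1] < name):
--                 lo = mid + 1
--             else:
--                 hi = mid
--         ranking.insert(lo, (total, name))
--     return [n for _, n in ranking]
-- ===== Notes on version B (the rewrite author's own statement) =====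
-- stated objective: alternative
-- what changed: B never calls sorted() and builds no dict: it maintains the ranking itself, scanning the database once and placing each client's (total, name) pair into an always-sorted list via a hand-written binary search for the insertion point, where A accumulates totals in a dict, copies it into an alphabetically pre-sorted dict and applies a second stable descending library sort. Pre_ excludes association lists with duplicate client keys, which do not encode a Python dict (A's declared parameter type).
import Mathlib
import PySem

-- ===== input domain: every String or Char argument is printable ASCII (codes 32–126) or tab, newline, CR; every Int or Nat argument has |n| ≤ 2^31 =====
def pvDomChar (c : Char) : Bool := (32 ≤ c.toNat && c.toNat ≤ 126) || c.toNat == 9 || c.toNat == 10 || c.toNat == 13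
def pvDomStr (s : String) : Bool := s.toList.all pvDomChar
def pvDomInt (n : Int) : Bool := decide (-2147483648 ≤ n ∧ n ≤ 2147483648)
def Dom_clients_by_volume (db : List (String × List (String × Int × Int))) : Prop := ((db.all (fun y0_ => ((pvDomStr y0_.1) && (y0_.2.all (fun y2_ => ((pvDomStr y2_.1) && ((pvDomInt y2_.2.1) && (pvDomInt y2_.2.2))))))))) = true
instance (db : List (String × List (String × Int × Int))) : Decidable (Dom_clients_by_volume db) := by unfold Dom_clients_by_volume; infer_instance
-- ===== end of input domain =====

-- B drops both library sorts and the dicts: one pass over the database places each client's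
-- (total, name) pair into an always-sorted ranking via a hand-written binary search; objective: alternative.


-- ===== PORT A =====
-- Literal port of A. db is a Python dict, encoded as its item list (keys distinct under Pre_);
-- db[i] is PySem.Dict lookup (always hits: i ∈ keys, so getD with an unused default is exact);
-- re_dict[i] inside the loop always hits too (inserted first), so getD 0 is exact;
-- sorted(re_dict) iterates the dict's keys.
def clients_by_volume (db : List (String × List (String × Int × Int))) : List String :=
  let c := db.map Prod.fst
  let re_dict : PySem.Dict String Int :=
    c.foldl (fun d i =>
      ((PySem.Dict.mk db).getD i []).foldl
        (fun d x =>
          let num := d.getD i 0 + |x.2.1|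
          d.insert i num)
        (d.insert i 0))
      PySem.Dict.empty
  let sorted_key : PySem.Dict String Int :=
    (PySem.List.sorted re_dict.keys (fun k => k) false).foldl
      (fun sk key => sk.insert key (re_dict.getD key 0)) PySem.Dict.empty
  let client_list := PySem.List.sorted sorted_key.items (fun x => x.2) true
  client_list.foldl (fun re_list client => re_list ++ [client.1]) []

-- ===== PORT B =====
-- Port of Source B. The while-loop binary search becomes pvFindPos: lo and hi are nonnegative Python
-- ints, ported as Nat ('(lo+hi)//2' on nonnegatives is Nat division, exact); ranking[mid] always
-- has 0 ≤ mid < len(ranking), so pyGetD with an unused default is exact; ranking.insert(lo, …)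
-- with 0 ≤ lo ≤ len(ranking) is PySem.List.insert.
def pvFindPos (x : Int × String) (r : List (Int × String)) (lo hi : Nat) : Nat :=
  if h : lo < hi then
    let mid := (lo + hi) / 2
    let e := PySem.List.pyGetD r (mid : Int) (0, "")
    if e.1 > x.1 ∨ (e.1 = x.1 ∧ e.2 < x.2) then pvFindPos x r (mid + 1) hi
    else pvFindPos x r lo mid
  else lo
termination_by hi - lo
decreasing_by all_goals omega

def clients_by_volume_alt (db : List (String × List (String × Int × Int))) : List String :=
  let ranking : List (Int × String) :=
    db.foldl (fun r p =>
      let total := p.2.foldl (fun t x => t + |x.2.1|) 0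
      let lo := pvFindPos (total, p.1) r 0 r.length
      PySem.List.insert r (lo : Int) (total, p.1)) []
  ranking.map (fun q => q.2)

-- ===== PRECONDITION & SPEC =====
-- Pre_ excludes association lists with duplicate client keys: those do not encode a Python dict
-- (A's declared parameter type), so the encoding is ambiguous there.
def Pre_clients_by_volume (db : List (String × List (String × Int × Int))) : Prop :=
  (db.map Prod.fst).Nodup
instance (db : List (String × List (String × Int × Int))) : Decidable (Pre_clients_by_volume db) := by unfold Pre_clients_by_volume; infer_instance

def pvWitness_clients_by_volume : (List (String × List (String × Int × Int))) :=
  [("a", [("x", 3, 1), ("y", -2, 0)]), ("b", [("z", 5, 2)])]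

def Spec_clients_by_volume (db : List (String × List (String × Int × Int))) (out : List String) : Prop := out = clients_by_volume_alt db
instance (db : List (String × List (String × Int × Int))) (out : List String) : Decidable (Spec_clients_by_volume db out) := by unfold Spec_clients_by_volume; infer_instance

-- ===== CLAIM (what is proved, stated in full; the proofs are below) =====
def Claim_equal_clients_by_volume : Prop := ∀ (db : List (String × List (String × Int × Int))), Dom_clients_by_volume db → Pre_clients_by_volume db → Spec_clients_by_volume db (clients_by_volume db)

-- ===== LEMMAS AND PROOFS =====

-- the strict order "(−value, key)-lexicographically earlier" on (name, total) pairs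
def pvLex (a b : String × Int) : Prop := b.2 < a.2 ∨ (a.2 = b.2 ∧ a.1 < b.1)

-- the swap that turns B's (total, name) entries into A's (name, total) pairs
def pvSw (q : Int × String) : String × Int := (q.2, q.1)

-- Source B's "e stays before the new pair x" test, as a Bool predicate on e
def pvP (x e : Int × String) : Bool := decide (e.1 > x.1 ∨ (e.1 = x.1 ∧ e.2 < x.2))

theorem pvLex_trans {a b c : String × Int} (h1 : pvLex a b) (h2 : pvLex b c) : pvLex a c := by
  rcases h1 with h1 | ⟨h1, h1'⟩ <;> rcases h2 with h2 | ⟨h2, h2'⟩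
  · exact Or.inl (lt_trans h2 h1)
  · exact Or.inl (h2 ▸ h1)
  · exact Or.inl (h1 ▸ h2)
  · exact Or.inr ⟨h1.trans h2, lt_trans h1' h2'⟩

theorem pvLex_asymm {a b : String × Int} (h1 : pvLex a b) (h2 : pvLex b a) : False := by
  rcases h1 with h1 | ⟨h1, h1'⟩ <;> rcases h2 with h2 | ⟨h2, h2'⟩
  · exact absurd h1 (not_lt_of_gt h2)
  · exact absurd h1 (h2 ▸ lt_irrefl _)
  · exact absurd h2 (h1 ▸ lt_irrefl _)
  · exact absurd h1' (not_lt_of_gt h2')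

theorem pvP_iff (x e : Int × String) : pvP x e = true ↔ pvLex (pvSw e) (pvSw x) := by
  simp only [pvP, decide_eq_true_eq, pvLex, pvSw, gt_iff_lt]

-- inserting x into an r-sorted list keeps it r-sorted, given that x relates
-- correctly (via the Bool comparison `before`) to every element already present
theorem insertBy_pairwise {α : Type} (r : α → α → Prop)
    (htrans : ∀ {a b c}, r a b → r b c → r a c)
    (before : α → α → Bool) (x : α) (ys : List α)
    (hp : ys.Pairwise r)
    (hc : ∀ y ∈ ys, (before x y = true → r x y) ∧ (before x y = false → r y x)) :
    (PySem.List.insertBy before x ys).Pairwise r := by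
  induction ys with
  | nil => simp [PySem.List.insertBy]
  | cons y ys ih =>
    rw [List.pairwise_cons] at hp
    by_cases hb : before x y = true
    · simp only [PySem.List.insertBy, hb, if_true]
      refine List.pairwise_cons.2 ⟨?_, List.pairwise_cons.2 ⟨hp.1, hp.2⟩⟩
      intro z hz
      rcases List.mem_cons.1 hz with rfl | hz
      · exact (hc z (List.mem_cons_self)).1 hb
      · exact htrans ((hc y (List.mem_cons_self)).1 hb) (hp.1 z hz)
    · simp only [PySem.List.insertBy, hb]
      refine List.pairwise_cons.2 ⟨?_, ih hp.2 (fun z hz => hc z (List.mem_cons_of_mem _ hz))⟩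
      intro z hz
      rcases (PySem.List.mem_insertBy _ _ _ _).1 hz with rfl | hz
      · exact (hc y (List.mem_cons_self)).2 (by simpa using hb)
      · exact hp.1 z hz

-- the whole insertBy fold is r-sorted when every later element relates correctly to every earlier one
theorem foldl_insertBy_pairwise {α : Type} (r : α → α → Prop)
    (htrans : ∀ {a b c}, r a b → r b c → r a c)
    (before : α → α → Bool) (xs : List α) (acc : List α)
    (hacc : acc.Pairwise r)
    (hmix : ∀ y ∈ acc, ∀ x ∈ xs, (before x y = true → r x y) ∧ (before x y = false → r y x))
    (hxs : xs.Pairwise (fun y x => (before x y = true → r x y) ∧ (before x y = false → r y x))) :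
    (xs.foldl (fun acc x => PySem.List.insertBy before x acc) acc).Pairwise r := by
  induction xs generalizing acc with
  | nil => exact hacc
  | cons x xs ih =>
    rw [List.pairwise_cons] at hxs
    simp only [List.foldl_cons]
    refine ih _ ?_ ?_ hxs.2
    · exact insertBy_pairwise r htrans before x acc hacc
        (fun y hy => hmix y hy x List.mem_cons_self)
    · intro y hy z hz
      rcases (PySem.List.mem_insertBy _ _ _ _).1 hy with rfl | hy
      · exact hxs.1 z hz
      · exact hmix y hy z (List.mem_cons_of_mem _ hz)

theorem insertBy_perm {α : Type} (before : α → α → Bool) (x : α) (l : List α) :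
    (PySem.List.insertBy before x l).Perm (x :: l) := by
  induction l with
  | nil => simp [PySem.List.insertBy]
  | cons y ys ih =>
    by_cases hb : before x y
    · simp [PySem.List.insertBy, hb]
    · simp only [PySem.List.insertBy, hb]
      exact (List.Perm.cons y ih).trans (List.Perm.swap x y ys)

theorem foldl_insertBy_perm {α : Type} (before : α → α → Bool) (xs : List α) (acc : List α) :
    (xs.foldl (fun acc x => PySem.List.insertBy before x acc) acc).Perm (xs ++ acc) := by
  induction xs generalizing acc with
  | nil => simp
  | cons x xs ih =>
    simp only [List.foldl_cons]
    refine (ih _).trans ?_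
    refine (List.Perm.append_left xs (insertBy_perm before x acc)).trans ?_
    exact List.perm_middle

-- insertBy with test "not (p e)" splits the list at the first element failing p
theorem insertBy_eq_takeWhile {α : Type} (before : α → α → Bool) (p : α → Bool)
    (x : α) (l : List α) (h : ∀ e, before x e = !p e) :
    PySem.List.insertBy before x l = l.takeWhile p ++ x :: l.dropWhile p := by
  induction l with
  | nil => simp [PySem.List.insertBy]
  | cons e t ih =>
    by_cases hp : p e
    · have hb : before x e = false := by rw [h, hp, Bool.not_true]
      simp only [PySem.List.insertBy, hb, Bool.false_eq_true, if_false,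
        List.takeWhile_cons, List.dropWhile_cons, hp, if_true, List.cons_append]
      rw [ih]
    · have hb : before x e = true := by
        rw [h, Bool.eq_false_iff.2 hp, Bool.not_false]
      simp [PySem.List.insertBy, hb, hp]

-- elementary takeWhile facts used below
theorem pv_tw_le {α : Type} (p : α → Bool) (l : List α) :
    (l.takeWhile p).length ≤ l.length := (List.takeWhile_prefix p).length_le

theorem pv_tw_getElem {α : Type} (p : α → Bool) (l : List α) (i : Nat)
    (hi : i < (l.takeWhile p).length) :
    (l.takeWhile p)[i] = l[i]'(Nat.lt_of_lt_of_le hi (pv_tw_le p l)) :=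
  (List.takeWhile_prefix p).getElem hi

theorem pv_tw_boundary {α : Type} (p : α → Bool) (l : List α)
    (h : (l.takeWhile p).length < l.length) :
    ¬ p (l[(l.takeWhile p).length]'h) := by
  induction l with
  | nil => simp at h
  | cons a t ih =>
    by_cases hp : p a
    · simp only [List.takeWhile_cons, hp, if_true, List.length_cons, List.getElem_cons_succ]
      exact ih (by simpa [hp] using h)
    · simp [hp]

theorem pv_take_tw {α : Type} (p : α → Bool) (l : List α) :
    l.take (l.takeWhile p).length = l.takeWhile p :=
  ((List.prefix_iff_eq_take).1 (List.takeWhile_prefix p)).symm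

theorem pv_drop_tw {α : Type} (p : α → Bool) (l : List α) :
    l.drop (l.takeWhile p).length = l.dropWhile p := by
  calc l.drop (l.takeWhile p).length
      = (l.takeWhile p ++ l.dropWhile p).drop (l.takeWhile p).length := by
        rw [List.takeWhile_append_dropWhile]
    _ = l.dropWhile p := List.drop_left

-- the binary search returns the unique boundary index b of the pvP-prefix
theorem pvFindPos_spec (x : Int × String) (r : List (Int × String)) (b : Nat)
    (hpre : ∀ i (h : i < r.length), i < b → pvP x r[i] = true)
    (hsuf : ∀ i (h : i < r.length), b ≤ i → pvP x r[i] = false) :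
    ∀ (n lo hi : Nat), hi - lo ≤ n → lo ≤ b → b ≤ hi → hi ≤ r.length → pvFindPos x r lo hi = b := by
  intro n
  induction n with
  | zero =>
    intro lo hi hn hlo hb hhi
    rw [pvFindPos, dif_neg (by omega)]
    omega
  | succ n ih =>
    intro lo hi hn hlo hb hhi
    by_cases hlt : lo < hi
    · rw [pvFindPos, dif_pos hlt]
      have hmid2 : (lo + hi) / 2 < r.length := by omega
      have hget : PySem.List.pyGetD r (((lo + hi) / 2 : Nat) : Int) (0, "") = r[(lo + hi) / 2] := by
        rw [PySem.List.pyGetD_natCast, List.getD_eq_getElem]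
      simp only [hget]
      by_cases hp : r[(lo + hi) / 2].1 > x.1 ∨ (r[(lo + hi) / 2].1 = x.1 ∧ r[(lo + hi) / 2].2 < x.2)
      · rw [if_pos hp]
        have hbound : (lo + hi) / 2 < b := by
          by_contra hc
          have hs := hsuf _ hmid2 (by omega)
          rw [pvP, decide_eq_false_iff_not] at hs
          exact hs hp
        exact ih _ _ (by omega) (by omega) hb hhi
      · rw [if_neg hp]
        have hbound : b ≤ (lo + hi) / 2 := by
          by_contra hc
          have hs := hpre _ hmid2 (by omega)
          rw [pvP, decide_eq_true_eq] at hs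
          exact hp hs
        exact ih _ _ (by omega) hlo (by omega) (by omega)
    · rw [pvFindPos, dif_neg hlt]
      omega

-- on a sorted ranking, Source B's binary-search insertion is exactly the ordered insertion insertBy
theorem pv_step_eq_insertBy (x : Int × String) (r : List (Int × String))
    (hchain : (r.map pvSw).Pairwise pvLex) :
    PySem.List.insert r ((pvFindPos x r 0 r.length : Nat) : Int) x
      = PySem.List.insertBy (fun x e => !pvP x e) x r := by
  set p : Int × String → Bool := fun e => pvP x e with hpdef
  set b := (r.takeWhile p).length with hbdef
  have hble : b ≤ r.length := pv_tw_le p r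
  have hpre : ∀ i (h : i < r.length), i < b → pvP x r[i] = true := by
    intro i h hib
    have h1 : p ((r.takeWhile p)[i]'(by omega)) = true :=
      List.mem_takeWhile_imp (List.getElem_mem (by omega))
    rw [pv_tw_getElem] at h1
    exact h1
  have hsuf : ∀ i (h : i < r.length), b ≤ i → pvP x r[i] = false := by
    intro i h hbi
    have hblt : b < r.length := by omega
    have hPb : pvP x (r[b]'hblt) = false := by
      have := pv_tw_boundary p r hblt
      rwa [Bool.not_eq_true] at this
    rcases Nat.eq_or_lt_of_le hbi with rfl | hlt
    · exact hPb
    · rw [Bool.eq_false_iff]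
      intro hPi
      have hchain' := List.pairwise_iff_getElem.1 hchain b i
        (by simpa using hblt) (by simpa using h) hlt
      rw [List.getElem_map, List.getElem_map] at hchain'
      have : pvP x (r[b]'hblt) = true :=
        (pvP_iff x _).2 (pvLex_trans hchain' ((pvP_iff x _).1 hPi))
      rw [hPb] at this
      exact absurd this (by simp)
  have hfp : pvFindPos x r 0 r.length = b :=
    pvFindPos_spec x r b hpre hsuf r.length 0 r.length (by omega) (by omega) hble le_rfl
  rw [hfp, PySem.List.insert_natCast r b x hble, hbdef, pv_take_tw, pv_drop_tw,
    insertBy_eq_takeWhile (fun x e => !pvP x e) p x r (fun e => rfl)]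

-- distinct names make every pair of database entries strictly comparable by (−total, name)
theorem pv_cond_of_nodup (l : List (Int × String)) (hnd : (l.map Prod.snd).Nodup) :
    l.Pairwise (fun y x => ((!pvP x y) = true → pvLex (pvSw x) (pvSw y))
      ∧ ((!pvP x y) = false → pvLex (pvSw y) (pvSw x))) := by
  have hne : l.Pairwise (fun a b => a.2 ≠ b.2) := by
    have := hnd
    rw [List.Nodup, List.pairwise_map] at this
    exact this
  refine hne.imp ?_
  intro y x hyx
  constructor
  · intro hb
    have hdf : pvP x y = false := by rwa [Bool.not_eq_true'] at hb
    unfold pvP at hdf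
    have hnot := of_decide_eq_false hdf
    simp only [pvSw, pvLex]
    rcases lt_trichotomy x.1 y.1 with h | h | h
    · exact absurd (Or.inl h) hnot
    · have hnotlt : ¬ y.2 < x.2 := fun hl => hnot (Or.inr ⟨h.symm, hl⟩)
      exact Or.inr ⟨h, lt_of_le_of_ne (not_lt.1 hnotlt) (Ne.symm hyx)⟩
    · exact Or.inl h
  · intro hb
    have hdt : pvP x y = true := by rwa [Bool.not_eq_false'] at hb
    unfold pvP at hdt
    have hc := of_decide_eq_true hdt
    simp only [pvSw, pvLex]
    exact hc

-- B's fold equals the ordered-insertion fold (the ranking is sorted at every step)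
theorem pv_foldB_eq (xs : List (Int × String)) :
    ∀ acc, (acc.map pvSw).Pairwise pvLex →
    (∀ y ∈ acc, ∀ x ∈ xs, ((!pvP x y) = true → pvLex (pvSw x) (pvSw y))
      ∧ ((!pvP x y) = false → pvLex (pvSw y) (pvSw x))) →
    xs.Pairwise (fun y x => ((!pvP x y) = true → pvLex (pvSw x) (pvSw y))
      ∧ ((!pvP x y) = false → pvLex (pvSw y) (pvSw x))) →
    xs.foldl (fun r x => PySem.List.insert r ((pvFindPos x r 0 r.length : Nat) : Int) x) acc
      = xs.foldl (fun acc x => PySem.List.insertBy (fun x e => !pvP x e) x acc) acc := by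
  induction xs with
  | nil => intro acc _ _ _; rfl
  | cons x xs ih =>
    intro acc hacc hmix hxs
    rw [List.pairwise_cons] at hxs
    simp only [List.foldl_cons]
    rw [pv_step_eq_insertBy x acc hacc]
    refine ih _ ?_ ?_ hxs.2
    · rw [List.pairwise_map]
      rw [List.pairwise_map] at hacc
      exact insertBy_pairwise (fun a b => pvLex (pvSw a) (pvSw b))
        (fun h1 h2 => pvLex_trans h1 h2) _ x acc hacc
        (fun y hy => hmix y hy x List.mem_cons_self)
    · intro y hy z hz
      rcases (PySem.List.mem_insertBy _ _ _ _).1 hy with rfl | hy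
      · exact hxs.1 z hz
      · exact hmix y hy z (List.mem_cons_of_mem _ hz)

-- the inner accumulation loop of A is a single insert of the abs-sum
theorem inner_loop_eq (l : List (String × Int × Int)) (d : PySem.Dict String Int) (i : String) (v : Int) :
    l.foldl (fun d x => d.insert i (d.getD i 0 + |x.2.1|)) (d.insert i v)
      = d.insert i (v + (l.map (fun t => |t.2.1|)).sum) := by
  induction l generalizing d v with
  | nil => simp
  | cons x l ih =>
    simp only [List.foldl_cons, PySem.Dict.getD_insert_self, PySem.Dict.insert_insert_self]
    rw [ih]
    simp [add_assoc]

-- A's re_dict equals the totals dict built by one insert per client (keys distinct)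
theorem re_dict_eq_totals (db : List (String × List (String × Int × Int)))
    (hnd : (db.map Prod.fst).Nodup) :
    ((db.map Prod.fst).foldl (fun d i =>
        (((PySem.Dict.mk db).getD i []).foldl
          (fun d x => d.insert i (d.getD i 0 + |x.2.1|)) (d.insert i 0)))
      PySem.Dict.empty)
    = db.foldl (fun d p => d.insert p.1 ((p.2.map (fun t => |t.2.1|)).sum)) PySem.Dict.empty := by
  rw [List.foldl_map]
  refine PySem.List.foldl_congr_mem _ _ _ _ ?_
  intro d p hp
  rw [inner_loop_eq, zero_add]
  have hitems : (p.1, p.2) ∈ (PySem.Dict.mk db).items := by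
    simpa [PySem.Dict.items] using hp
  have hk : (PySem.Dict.mk db).keys.Nodup := by simpa [PySem.Dict.keys, PySem.Dict.items] using hnd
  rw [PySem.Dict.getD_of_mem_items _ hitems hk]

-- B's program, unfolded: totals once per client, then the binary-search-insert fold over pairs
theorem alt_unfold (db : List (String × List (String × Int × Int))) :
    clients_by_volume_alt db
      = ((db.map (fun p => ((p.2.map (fun t => |t.2.1|)).sum, p.1))).foldl
          (fun r x => PySem.List.insert r ((pvFindPos x r 0 r.length : Nat) : Int) x) []).map
            (fun q => q.2) := by
  unfold clients_by_volume_alt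
  refine congrArg (List.map (fun q : Int × String => q.2)) ?_
  rw [List.foldl_map]
  refine PySem.List.foldl_congr_mem _ _ _ _ ?_
  intro r p hp
  simp only [PySem.List.foldl_add, zero_add]

-- ===== VERDICT (by name: the statement is the Claim_ definition above) =====
theorem clients_by_volume_spec : Claim_equal_clients_by_volume := by
  intro db _hdom hpre
  have hnd : (db.map Prod.fst).Nodup := hpre
  simp only [Spec_clients_by_volume, clients_by_volume]
  rw [re_dict_eq_totals db hnd, alt_unfold db]
  set G := db.map (fun p => ((p.2.map (fun t => |t.2.1|)).sum, p.1)) with hG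
  have hGsnd : (G.map Prod.snd).Nodup := by
    rw [hG, List.map_map]
    exact hnd
  rw [pv_foldB_eq G [] (by simp) (by simp) (pv_cond_of_nodup G hGsnd)]
  set T : PySem.Dict String Int :=
    db.foldl (fun d p => d.insert p.1 ((p.2.map (fun t => |t.2.1|)).sum)) PySem.Dict.empty with hT
  set f : String → String × Int := fun k => (k, T.getD k 0) with hf
  have hkeys : T.keys = db.map Prod.fst := by
    rw [hT, PySem.Dict.keys_foldl_insert_key db Prod.fst
      (fun _ p => ((p.2.map (fun t => |t.2.1|)).sum))]
    rw [PySem.Dict.keys_empty, PySem.Set.update_nil_left,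
      PySem.Set.ofList_eq_self_of_nodup _ hnd]
  have hkeysnd : T.keys.Nodup := hkeys ▸ hnd
  have hTitems : T.items = db.map (fun p => (p.1, (p.2.map (fun t => |t.2.1|)).sum)) := by
    rw [hT, PySem.Dict.items_foldl_insert_fresh db Prod.fst
      (fun p => ((p.2.map (fun t => |t.2.1|)).sum)) PySem.Dict.empty
      (fun a _ => PySem.Dict.contains_empty a.1) hnd]
    simp [PySem.Dict.empty]
  have hgetD : ∀ p ∈ db, T.getD p.1 0 = (p.2.map (fun t => |t.2.1|)).sum := by
    intro p hp
    have hm : (p.1, (p.2.map (fun t => |t.2.1|)).sum) ∈ T.items := by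
      rw [hTitems]; exact List.mem_map_of_mem hp
    exact PySem.Dict.getD_of_mem_items T hm hkeysnd 0
  have hsknd : (PySem.List.sorted T.keys (fun k => k) false).Nodup :=
    (PySem.List.sorted_perm T.keys (fun k => k) false).nodup_iff.2 hkeysnd
  have hitems2 : (((PySem.List.sorted T.keys (fun k => k) false).foldl
      (fun sk key => sk.insert key (T.getD key 0)) PySem.Dict.empty)).items
      = (PySem.List.sorted T.keys (fun k => k) false).map f := by
    rw [PySem.Dict.items_foldl_insert_fresh _ (fun k => k) (fun k => T.getD k 0)
      PySem.Dict.empty (fun a _ => PySem.Dict.contains_empty a) (by simpa using hsknd)]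
    simp [PySem.Dict.empty, hf]
  rw [hitems2]
  set SK := PySem.List.sorted T.keys (fun k => k) false with hSK
  set SA := PySem.List.sorted (SK.map f) (fun x => x.2) true with hSA
  set R := G.foldl (fun acc x => PySem.List.insertBy (fun x e => !pvP x e) x acc) [] with hR
  have hskperm : SK.Perm T.keys := PySem.List.sorted_perm _ _ _
  -- the main equality of sorted pair lists: SA = R.map pvSw
  have hmain : SA = R.map pvSw := by
    refine List.Perm.eq_of_pairwise (le := pvLex)
      (fun a b _ _ h1 h2 => absurd h1 (fun h1 => pvLex_asymm h1 h2)) ?_ ?_ ?_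
    · -- A's stable descending sort of the strictly-alphabetical list is a pvLex-chain
      rw [hSA, PySem.List.sorted_rev_eq_foldl_insertBy]
      refine foldl_insertBy_pairwise pvLex (fun h1 h2 => pvLex_trans h1 h2) _ _ []
        List.Pairwise.nil (by simp) ?_
      have hsklt : SK.Pairwise (fun a b => a < b) := by
        have h1 : SK.Pairwise (fun a b => a ≤ b) := PySem.List.sorted_pairwise _ _
        exact (h1.and hsknd).imp (fun h => lt_of_le_of_ne h.1 h.2)
      have hmaplt : (SK.map f).Pairwise (fun a b => a.1 < b.1) := by
        rw [List.pairwise_map]; simp only [hf]; exact hsklt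
      refine hmaplt.imp ?_
      intro y x hyx
      refine ⟨fun hb => Or.inl (of_decide_eq_true hb), fun hb => ?_⟩
      have hle : x.2 ≤ y.2 := not_lt.1 (of_decide_eq_false hb)
      rcases lt_or_eq_of_le hle with h | h
      · exact Or.inl h
      · exact Or.inr ⟨h.symm, hyx⟩
    · -- B's incremental ordered insertion builds a pvLex-chain (names distinct)
      rw [hR, List.pairwise_map]
      exact foldl_insertBy_pairwise (fun a b => pvLex (pvSw a) (pvSw b))
        (fun h1 h2 => pvLex_trans h1 h2) _ G [] List.Pairwise.nil (by simp)
        (pv_cond_of_nodup G hGsnd)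
    · -- both are rearrangements of the same (name, total) pairs
      have hperm1 : SA.Perm (T.keys.map f) :=
        (PySem.List.sorted_perm _ _ _).trans (hskperm.map f)
      have hRperm : R.Perm G := by
        rw [hR]
        simpa using foldl_insertBy_perm (fun x e => !pvP x e) G []
      have hperm2 : (R.map pvSw).Perm (G.map pvSw) := hRperm.map pvSw
      have heqmaps : G.map pvSw = T.keys.map f := by
        rw [hG, hkeys, List.map_map, List.map_map]
        refine List.map_congr_left ?_
        intro p hp
        simp only [Function.comp, pvSw, hf]
        rw [hgetD p hp]
      exact hperm1.trans ((heqmaps ▸ hperm2).symm)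
  rw [hmain, PySem.List.foldl_append_singleton_eq_map (f := fun c : String × Int => c.1)]
  simp [pvSw, Function.comp_def]
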